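-- pv_equiv track=rewrite | github.com/fabranx/AdventOfCode | 2024/event25/event25.py | getKeyPinHeight
-- ===== SOURCE A (Python) =====
-- def getKeyPinHeight(key):
--     pin_height = []
--     for col in range(len(key[0])):
--         pin = []
--         for row in range(len(key)-1):
--             pin.append(key[row][col])
--         pin_height.append(pin.count('#'))
--
--     return tuple(pin_height)
-- ===== SOURCE B (Python) =====
-- def getKeyPinHeight(key):
--     counts = [0] * len(key[0])
--     for row in key[:-1]:
--         counts = [c + (ch == '#') for c, ch in zip(counts, row)]
--     return tuple(counts)
-- ===== Notes on version B (the rewrite author's own statement) =====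
-- stated objective: faster
-- what changed: Column-major double loop with per-column list building and .count is replaced by a single row-major pass keeping a running per-column tally updated with zip (cache-friendly, no per-column list construction).
import Mathlib
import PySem

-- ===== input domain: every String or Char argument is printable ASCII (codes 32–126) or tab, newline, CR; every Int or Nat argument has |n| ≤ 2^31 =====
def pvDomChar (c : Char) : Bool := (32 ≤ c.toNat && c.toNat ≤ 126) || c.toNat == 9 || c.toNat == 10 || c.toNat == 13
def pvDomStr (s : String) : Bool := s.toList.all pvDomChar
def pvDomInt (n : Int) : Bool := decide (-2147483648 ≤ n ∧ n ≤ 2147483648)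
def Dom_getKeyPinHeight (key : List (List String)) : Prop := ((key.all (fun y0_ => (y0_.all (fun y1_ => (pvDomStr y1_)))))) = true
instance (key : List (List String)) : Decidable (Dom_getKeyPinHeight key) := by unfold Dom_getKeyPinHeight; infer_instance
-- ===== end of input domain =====

-- B replaces A's column-major double loop (build each column, then .count('#')) by one
-- row-major pass over key[:-1] that keeps a running per-column tally updated with zip.

-- ===== PORT A =====
def getKeyPinHeight (key : List (List String)) : List Int :=
  (PySem.List.pyRange 0 ((PySem.List.pyGetD key 0 []).length : Int) 1).foldl
    (fun pin_height col =>
      let pin := (PySem.List.pyRange 0 ((key.length : Int) - 1) 1).foldl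
        (fun pin row => pin ++ [PySem.List.pyGetD (PySem.List.pyGetD key row []) col ""]) []
      pin_height ++ [(PySem.List.count pin "#" : Int)]) []

-- ===== PORT B =====
def getKeyPinHeight_alt (key : List (List String)) : List Int :=
  let counts0 : List Int := List.replicate (PySem.List.pyGetD key 0 []).length 0
  (PySem.List.slice key none (some (-1))).foldl
    (fun counts row =>
      (counts.zip row).map (fun p => p.1 + (if p.2 == "#" then 1 else 0)))
    counts0

-- ===== PRECONDITION & SPEC =====
-- Pre_ excludes exactly the inputs on which A raises IndexError: the empty key
-- (key[0]) and keys where some row other than the last is shorter than the first row.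
def Pre_getKeyPinHeight (key : List (List String)) : Prop :=
  key ≠ [] ∧ ∀ row ∈ key.dropLast, (key.getD 0 []).length ≤ row.length
instance (key : List (List String)) : Decidable (Pre_getKeyPinHeight key) := by
  unfold Pre_getKeyPinHeight; infer_instance

def pvWitness_getKeyPinHeight : List (List String) := [["#", "."], [".", "#"], ["#", "#"]]

def Spec_getKeyPinHeight (key : List (List String)) (out : List Int) : Prop :=
  out = getKeyPinHeight_alt key
instance (key : List (List String)) (out : List Int) : Decidable (Spec_getKeyPinHeight key out) := by
  unfold Spec_getKeyPinHeight; infer_instance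

-- ===== CLAIM (what is proved, stated in full; the proofs are below) =====
def Claim_equal_getKeyPinHeight : Prop :=
  ∀ (key : List (List String)), Dom_getKeyPinHeight key → Pre_getKeyPinHeight key →
    Spec_getKeyPinHeight key (getKeyPinHeight key)

-- ===== LEMMAS AND PROOFS =====

-- the rows A's inner loop reads, as a list: indices 0..len-2 are exactly key.dropLast
theorem pv_rows_eq (key : List (List String)) :
    (List.range (key.length - 1)).map (fun r => key.getD r []) = key.dropLast := by
  apply List.ext_getElem
  · simp
  · intro i h1 h2
    have hlen : i < key.length - 1 := by simpa using h1
    have hik : i < key.length := by omega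
    simp [List.getD_eq_getElem?_getD, List.getElem?_eq_getElem hik,
      List.getElem_dropLast]

-- one zip step of B on a tally indexed by range n, for a row of length ≥ n
theorem pv_step (n : Nat) (base : Nat → Int) (row : List String) (h : n ≤ row.length) :
    ((((List.range n).map base).zip row).map
        (fun p => p.1 + (if p.2 == "#" then 1 else 0)))
      = (List.range n).map (fun c => base c + (if row.getD c "" == "#" then 1 else 0)) := by
  apply List.ext_getElem
  · simp; omega
  · intro i h1 h2
    have hin : i < n := by simpa using h2
    have hir : i < row.length := by omega
    simp [List.getElem_zip, List.getD_eq_getElem?_getD, List.getElem?_eq_getElem hir]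

-- B's fold keeps the invariant: tally = base + per-column '#' count of the rows seen
theorem pv_fold (n : Nat) (rows : List (List String)) :
    ∀ base : Nat → Int, (∀ row ∈ rows, n ≤ row.length) →
    rows.foldl
        (fun counts row =>
          (counts.zip row).map (fun p => p.1 + (if p.2 == "#" then 1 else 0)))
        ((List.range n).map base)
      = (List.range n).map
          (fun c => base c + ((rows.countP (fun row => row.getD c "" == "#") : Nat) : Int)) := by
  induction rows with
  | nil => intro base _; simp
  | cons row rows ih =>
    intro base h
    have hrow : n ≤ row.length := h row (by simp)
    have hrest : ∀ r ∈ rows, n ≤ r.length := fun r hr => h r (by simp [hr])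
    simp only [List.foldl_cons, pv_step n base row hrow,
      ih (fun c => base c + (if row.getD c "" == "#" then 1 else 0)) hrest]
    apply List.map_congr_left
    intro c _
    simp only [List.countP_cons]
    push_cast [apply_ite (Int.ofNat)]
    ring

theorem pv_main (key : List (List String)) (hpre : Pre_getKeyPinHeight key) :
    getKeyPinHeight key = getKeyPinHeight_alt key := by
  obtain ⟨hne, hrows⟩ := hpre
  have hlen : 1 ≤ key.length := by
    cases key with
    | nil => exact absurd rfl hne
    | cons _ _ => simp
  set n := (key.getD 0 []).length with hn
  -- A side
  have hm : ((key.length : Int) - 1) = ((key.length - 1 : Nat) : Int) := by push_cast [hlen]; ring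
  have hA : getKeyPinHeight key
      = (List.range n).map
          (fun c => ((key.dropLast.countP (fun row => row.getD c "" == "#") : Nat) : Int)) := by
    unfold getKeyPinHeight
    rw [hm]
    simp only [PySem.List.pyGetD_zero, PySem.List.pyRange_one, ← hn]
    simp only [Int.sub_zero, Int.toNat_natCast, Int.zero_add,
      PySem.List.foldl_append_singleton_eq_map, List.nil_append, List.map_map]
    apply List.map_congr_left
    intro c _
    simp only [Function.comp_apply]
    congr 1
    rw [PySem.List.count_eq, List.count_eq_countP, List.countP_map,
      ← pv_rows_eq key, List.countP_map]
    apply List.countP_congr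
    intro r _
    simp [Function.comp, PySem.List.pyGetD_natCast]
  -- B side
  have hB : getKeyPinHeight_alt key
      = (List.range n).map
          (fun c => ((key.dropLast.countP (fun row => row.getD c "" == "#") : Nat) : Int)) := by
    unfold getKeyPinHeight_alt
    simp only [PySem.List.pyGetD_zero, PySem.List.slice_to_neg_one, ← hn]
    have hrep : (List.replicate n (0 : Int)) = (List.range n).map (fun _ => (0 : Int)) := by
      simp [List.map_const']
    rw [hrep, pv_fold n key.dropLast (fun _ => 0) hrows]
    simp
  rw [hA, hB]

-- ===== VERDICT (by name: the statement is the Claim_ definition above) =====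
theorem getKeyPinHeight_spec : Claim_equal_getKeyPinHeight := by
  intro key _ hpre
  unfold Spec_getKeyPinHeight
  exact pv_main key hpre
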